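-- pv_equiv track=rewrite | github.com/collinsakenga/codewars_solutions | Retired/Easy Cipher.py | easy_cipher
-- ===== SOURCE A (Python) =====
-- def easy_cipher(text):
--     temp="".join(text.lower().split())
--     dict={'a': 'l', 'g': 'o', 'r': 'i', 't': 'h', 'm': 's', 'p': 'y','A': 'L', 'G': 'O', 'R': 'I', 'T': 'H', 'M': 'S', 'P': 'Y','l': 'a', 'o': 'g', 'i': 'r', 'h': 't', 's': 'm', 'y': 'p', 'L': 'A', 'O': 'G', 'I': 'R', 'H': 'T', 'S': 'M', 'Y': 'P'}
--     res=""
--     num=""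
--     for i in temp:
--         if not i.isdigit():
--             if num:
--                 res+=str(int(num)+100)
--                 num=""
--             res+=dict[i] if i in dict else i
--         else:
--             num+=i
--     if num:
--         res+=str(int(num)+100)
--     return res
-- ===== SOURCE B (Python) =====
-- def easy_cipher(text):
--     temp = "".join(text.lower().split())
--     table = str.maketrans("agrtmploihsy", "loihsyagrtmp")
--     res = []
--     i, n = 0, len(temp)
--     while i < n:
--         j = i
--         if temp[i].isdigit():
--             while j < n and temp[j].isdigit():
--                 j += 1
--             res.append(str(int(temp[i:j]) + 100))
--         else:
--             while j < n and not temp[j].isdigit():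
--                 j += 1
--             res.append(temp[i:j].translate(table))
--         i = j
--     return "".join(res)
-- ===== Notes on version B (the rewrite author's own statement) =====
-- stated objective: alternative
-- what changed: Replaces A's per-character loop with a manual digit buffer and flush logic by a scan over maximal digit/non-digit runs (inner while loops find each run's end), translating letter runs through a fixed table and converting each digit run once.
import Mathlib
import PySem

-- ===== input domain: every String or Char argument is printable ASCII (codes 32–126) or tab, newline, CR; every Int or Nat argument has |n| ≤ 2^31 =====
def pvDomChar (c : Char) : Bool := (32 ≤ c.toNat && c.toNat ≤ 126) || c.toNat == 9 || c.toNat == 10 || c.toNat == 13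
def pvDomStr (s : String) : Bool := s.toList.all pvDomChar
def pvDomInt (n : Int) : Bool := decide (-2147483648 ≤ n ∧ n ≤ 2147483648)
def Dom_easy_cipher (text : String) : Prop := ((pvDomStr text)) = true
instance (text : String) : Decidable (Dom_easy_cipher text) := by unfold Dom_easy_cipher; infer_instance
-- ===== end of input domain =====

-- B replaces A's per-character loop with a flush buffer by a scan over maximal
-- digit/non-digit runs using a fixed translation table; objective: alternative
-- decomposition (same asymptotic cost).

-- ===== PORT A =====
-- A's dict literal (all keys distinct, so insertion order = this list)
def cipherDictA : PySem.Dict Char Char :=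
  PySem.Dict.mk [('a','l'),('g','o'),('r','i'),('t','h'),('m','s'),('p','y'),
    ('A','L'),('G','O'),('R','I'),('T','H'),('M','S'),('P','Y'),
    ('l','a'),('o','g'),('i','r'),('h','t'),('s','m'),('y','p'),
    ('L','A'),('O','G'),('I','R'),('H','T'),('S','M'),('Y','P')]

-- str(int(num)+100); `int(num)` cannot raise here: num is always a nonempty run
-- of ASCII decimal digits, so the `.getD 0` default branch is unreachable
def cipherEmit (num : List Char) : List Char :=
  PySem.Int.toChars ((PySem.Int.ofChars? num).getD 0 + 100)

-- body of A's `for i in temp:` loop; state = (res, num)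
def cipherStepA (st : List Char × List Char) (i : Char) : List Char × List Char :=
  if !(PySem.Chars.isdigit i) then
    let res := if st.2 ≠ [] then st.1 ++ cipherEmit st.2 else st.1
    (res ++ [(cipherDictA.get? i).getD i], [])
  else (st.1, st.2 ++ [i])

def easy_cipher (text : String) : String :=
  let temp := PySem.Chars.join [] (PySem.Chars.split₀ (PySem.Chars.lower text.toList))
  let st := temp.foldl cipherStepA ([], [])
  String.ofList (if st.2 ≠ [] then st.1 ++ cipherEmit st.2 else st.1)

-- ===== PORT B =====
-- str.maketrans("agrtmploihsy", "loihsyagrtmp") as a function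
def cipherTable (c : Char) : Char :=
  if c = 'a' then 'l' else if c = 'g' then 'o' else if c = 'r' then 'i'
  else if c = 't' then 'h' else if c = 'm' then 's' else if c = 'p' then 'y'
  else if c = 'l' then 'a' else if c = 'o' then 'g' else if c = 'i' then 'r'
  else if c = 'h' then 't' else if c = 's' then 'm' else if c = 'y' then 'p' else c

-- B's outer while loop: take the maximal run with the digit-ness of the head
-- (the inner `while j < n and …` scans), emit it, continue after it
def cipherRuns (cs : List Char) : List Char :=
  match cs with
  | [] => []
  | c :: rest =>
    let run := rest.takeWhile (fun x => PySem.Chars.isdigit x == PySem.Chars.isdigit c)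
    (if PySem.Chars.isdigit c then cipherEmit (c :: run)
     else (c :: run).map cipherTable) ++
      cipherRuns (rest.dropWhile (fun x => PySem.Chars.isdigit x == PySem.Chars.isdigit c))
termination_by cs.length
decreasing_by
  simp only [List.length_cons]
  exact Nat.lt_succ_of_le (List.length_dropWhile_le ..)

def easy_cipher_alt (text : String) : String :=
  let temp := PySem.Chars.join [] (PySem.Chars.split₀ (PySem.Chars.lower text.toList))
  String.ofList (cipherRuns temp)

-- ===== PRECONDITION & SPEC =====
def Spec_easy_cipher (text : String) (out : String) : Prop := out = easy_cipher_alt text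
instance (text : String) (out : String) : Decidable (Spec_easy_cipher text out) := by unfold Spec_easy_cipher; infer_instance

-- ===== CLAIM (what is proved, stated in full; the proofs are below) =====
def Claim_equal_easy_cipher : Prop := ∀ (text : String), Dom_easy_cipher text → Spec_easy_cipher text (easy_cipher text)

-- ===== LEMMAS AND PROOFS =====

theorem join_nil_flatten (l : List (List Char)) : PySem.Chars.join [] l = l.flatten := by
  induction l with
  | nil => simp [PySem.Chars.join, List.intercalate]
  | cons a l ih =>
    cases l with
    | nil => simp [PySem.Chars.join, List.intercalate]
    | cons b l' =>
      have := PySem.Chars.join_cons_cons ([] : List Char) a b l'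
      simp_all [List.flatten]

theorem split0_go_filter : ∀ (s : List Char) (cur : List Char) (acc : List (List Char)),
    (PySem.Chars.split₀.go s cur acc).flatten =
      acc.reverse.flatten ++ cur.reverse ++ s.filter (fun c => !PySem.Chars.isspace c) := by
  intro s
  induction s with
  | nil =>
    intro cur acc
    by_cases h : cur = []
    · simp [PySem.Chars.split₀.go, h]
    · simp [PySem.Chars.split₀.go, List.isEmpty_iff, h]
  | cons c rest ih =>
    intro cur acc
    by_cases hs : PySem.Chars.isspace c = true
    · by_cases h : cur = []
      · simp [PySem.Chars.split₀.go, hs, h, ih]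
      · simp [PySem.Chars.split₀.go, hs, List.isEmpty_iff, h, ih]
    · simp [PySem.Chars.split₀.go, hs, ih]

theorem temp_eq_filter (xs : List Char) :
    PySem.Chars.join [] (PySem.Chars.split₀ xs) =
      xs.filter (fun c => !PySem.Chars.isspace c) := by
  rw [join_nil_flatten]
  simpa using split0_go_filter xs [] []

theorem isupper_lowerChar (c : Char) : PySem.Chars.isupper (PySem.Chars.lowerChar c) = false := by
  unfold PySem.Chars.lowerChar
  by_cases h : PySem.Chars.isupper c = true
  · simp only [h, if_true]
    simp only [PySem.Chars.isupper, Bool.and_eq_true, decide_eq_true_eq] at h ⊢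
    have h1 : 65 ≤ c.toNat ∧ c.toNat ≤ 90 := by
      constructor <;> [exact h.1; exact h.2]
    have hv : (Char.ofNat (c.toNat + 32)).toNat = c.toNat + 32 := by
      rw [Char.toNat_ofNat, if_pos]
      exact Or.inl (by omega)
    simp only [Bool.and_eq_false_iff, decide_eq_false_iff_not, Char.le_def]
    right
    intro hle
    have : (Char.ofNat (c.toNat + 32)).toNat ≤ ('Z' : Char).toNat := by
      exact hle
    rw [hv] at this
    have : c.toNat + 32 ≤ 90 := this
    omega
  · rw [if_neg (by simp [h])]
    simpa using h

theorem trAB (c : Char) (hup : PySem.Chars.isupper c = false) :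
    (cipherDictA.get? c).getD c = cipherTable c := by
  by_cases h1 : c = 'a'; · subst h1; decide
  by_cases h2 : c = 'g'; · subst h2; decide
  by_cases h3 : c = 'r'; · subst h3; decide
  by_cases h4 : c = 't'; · subst h4; decide
  by_cases h5 : c = 'm'; · subst h5; decide
  by_cases h6 : c = 'p'; · subst h6; decide
  by_cases h7 : c = 'l'; · subst h7; decide
  by_cases h8 : c = 'o'; · subst h8; decide
  by_cases h9 : c = 'i'; · subst h9; decide
  by_cases h10 : c = 'h'; · subst h10; decide
  by_cases h11 : c = 's'; · subst h11; decide
  by_cases h12 : c = 'y'; · subst h12; decide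
  have hA : c ≠ 'A' := by rintro rfl; exact absurd hup (by decide)
  have hG : c ≠ 'G' := by rintro rfl; exact absurd hup (by decide)
  have hR : c ≠ 'R' := by rintro rfl; exact absurd hup (by decide)
  have hT : c ≠ 'T' := by rintro rfl; exact absurd hup (by decide)
  have hM : c ≠ 'M' := by rintro rfl; exact absurd hup (by decide)
  have hP : c ≠ 'P' := by rintro rfl; exact absurd hup (by decide)
  have hL : c ≠ 'L' := by rintro rfl; exact absurd hup (by decide)
  have hO : c ≠ 'O' := by rintro rfl; exact absurd hup (by decide)
  have hI : c ≠ 'I' := by rintro rfl; exact absurd hup (by decide)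
  have hH : c ≠ 'H' := by rintro rfl; exact absurd hup (by decide)
  have hS : c ≠ 'S' := by rintro rfl; exact absurd hup (by decide)
  have hY : c ≠ 'Y' := by rintro rfl; exact absurd hup (by decide)
  have bs : ∀ (k : Char), c ≠ k → (k == c) = false := fun k hk => beq_eq_false_iff_ne.2 (Ne.symm hk)
  simp [cipherDictA, PySem.Dict.get?, List.find?, cipherTable,
    h1, h2, h3, h4, h5, h6, h7, h8, h9, h10, h11, h12,
    bs _ h1, bs _ h2, bs _ h3, bs _ h4, bs _ h5, bs _ h6,
    bs _ h7, bs _ h8, bs _ h9, bs _ h10, bs _ h11, bs _ h12,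
    bs _ hA, bs _ hG, bs _ hR, bs _ hT, bs _ hM, bs _ hP,
    bs _ hL, bs _ hO, bs _ hI, bs _ hH, bs _ hS, bs _ hY]

theorem takeWhile_all_cons_append (p : Char → Bool) (xs ys : List Char) (c : Char)
    (hall : ∀ x ∈ xs, p x = true) (hc : p c = false) :
    (xs ++ c :: ys).takeWhile p = xs := by
  induction xs with
  | nil => simp [hc]
  | cons a xs ih =>
    have ha : p a = true := hall a (by simp)
    simp [ha, ih (fun x hx => hall x (by simp [hx]))]

theorem dropWhile_all_cons_append (p : Char → Bool) (xs ys : List Char) (c : Char)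
    (hall : ∀ x ∈ xs, p x = true) (hc : p c = false) :
    (xs ++ c :: ys).dropWhile p = c :: ys := by
  induction xs with
  | nil => simp [hc]
  | cons a xs ih =>
    have ha : p a = true := hall a (by simp)
    simp [ha, ih (fun x hx => hall x (by simp [hx]))]

-- a non-digit head is its own translated character followed by the rest
theorem runs_nondigit_cons (c : Char) (cs : List Char)
    (hc : PySem.Chars.isdigit c = false) :
    cipherRuns (c :: cs) = cipherTable c :: cipherRuns cs := by
  rw [cipherRuns, hc]
  simp only [if_neg (by simp : ¬ (false = true))]
  cases cs with
  | nil => simp [cipherRuns]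
  | cons d tl =>
    by_cases hd : PySem.Chars.isdigit d = true
    · simp [hd]
    · have hd' : PySem.Chars.isdigit d = false := by simpa using hd
      rw [cipherRuns, hd']
      simp [hd']

-- a pending all-digit buffer followed by a non-digit char: the buffer is one run
theorem runs_digit_pending (num : List Char) (c : Char) (cs : List Char)
    (hnum : ∀ d ∈ num, PySem.Chars.isdigit d = true)
    (hne : num ≠ [])
    (hc : PySem.Chars.isdigit c = false) :
    cipherRuns (num ++ c :: cs) = cipherEmit num ++ cipherRuns (c :: cs) := by
  cases num with
  | nil => exact absurd rfl hne
  | cons d tl =>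
    have hd : PySem.Chars.isdigit d = true := hnum d (by simp)
    have htl : ∀ x ∈ tl, (fun x => PySem.Chars.isdigit x == true) x = true := by
      intro x hx; simp [hnum x (by simp [hx])]
    have hcp : (fun x => PySem.Chars.isdigit x == true) c = false := by
      simp [hc]
    rw [List.cons_append, cipherRuns, hd]
    rw [takeWhile_all_cons_append _ tl cs c htl hcp,
        dropWhile_all_cons_append _ tl cs c htl hcp]
    simp

-- an all-digit tail is a single run
theorem runs_all_digits (num : List Char)
    (hnum : ∀ d ∈ num, PySem.Chars.isdigit d = true) (hne : num ≠ []) :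
    cipherRuns num = cipherEmit num := by
  cases num with
  | nil => exact absurd rfl hne
  | cons d tl =>
    have hd : PySem.Chars.isdigit d = true := hnum d (by simp)
    rw [cipherRuns, hd]
    have h1 : tl.takeWhile (fun x => PySem.Chars.isdigit x == true) = tl := by
      rw [List.takeWhile_eq_self_iff]
      intro x hx; simp [hnum x (by simp [hx])]
    have h2 : tl.dropWhile (fun x => PySem.Chars.isdigit x == true) = [] := by
      rw [List.dropWhile_eq_nil_iff]
      intro x hx; simp [hnum x (by simp [hx])]
    rw [h1, h2]
    simp [cipherRuns]

-- main loop invariant: A's fold with pending buffer num equals B's run scan of num ++ cs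
theorem loop_eq : ∀ (cs res num : List Char),
    (∀ c ∈ cs, PySem.Chars.isupper c = false) →
    (∀ d ∈ num, PySem.Chars.isdigit d = true) →
    (let st := cs.foldl cipherStepA (res, num);
     if st.2 ≠ [] then st.1 ++ cipherEmit st.2 else st.1) = res ++ cipherRuns (num ++ cs) := by
  intro cs
  induction cs with
  | nil =>
    intro res num _ hnum
    simp only [List.foldl_nil, List.append_nil]
    by_cases h : num = []
    · simp [h, cipherRuns]
    · simp only [h, ne_eq, not_false_eq_true, if_pos]
      rw [runs_all_digits num hnum h]
  | cons c cs ih =>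
    intro res num hup hnum
    have hupc : PySem.Chars.isupper c = false := hup c (by simp)
    have hup' : ∀ x ∈ cs, PySem.Chars.isupper x = false := fun x hx => hup x (by simp [hx])
    by_cases hd : PySem.Chars.isdigit c = true
    · have : cipherStepA (res, num) c = (res, num ++ [c]) := by
        simp [cipherStepA, hd]
      rw [List.foldl_cons, this]
      have := ih res (num ++ [c]) hup' (by
        intro d hdm
        rcases List.mem_append.1 hdm with h | h
        · exact hnum d h
        · simp at h; subst h; exact hd)
      rw [this]
      simp
    · have hd' : PySem.Chars.isdigit c = false := by simpa using hd
      have hstep : cipherStepA (res, num) c =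
          ((if num ≠ [] then res ++ cipherEmit num else res) ++ [(cipherDictA.get? c).getD c], []) := by
        simp [cipherStepA, hd']
      rw [List.foldl_cons, hstep]
      rw [ih _ [] hup' (by intro d h; simp at h)]
      rw [trAB c hupc]
      by_cases h : num = []
      · subst h
        simp [runs_nondigit_cons c cs hd']
      · rw [runs_digit_pending num c cs hnum h hd']
        simp [h, runs_nondigit_cons c cs hd']

-- ===== VERDICT (by name: the statement is the Claim_ definition above) =====
theorem easy_cipher_spec : Claim_equal_easy_cipher := by
  intro text _
  unfold Spec_easy_cipher easy_cipher easy_cipher_alt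
  have hup : ∀ c ∈ PySem.Chars.join [] (PySem.Chars.split₀ (PySem.Chars.lower text.toList)),
      PySem.Chars.isupper c = false := by
    intro c hc
    rw [temp_eq_filter] at hc
    have := List.mem_of_mem_filter hc
    simp only [PySem.Chars.lower, List.mem_map] at this
    obtain ⟨d, _, rfl⟩ := this
    exact isupper_lowerChar d
  have := loop_eq (PySem.Chars.join [] (PySem.Chars.split₀ (PySem.Chars.lower text.toList)))
    [] [] hup (by intro d h; simp at h)
  simp only [List.nil_append] at this
  exact congrArg String.ofList this
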